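-- pv_equiv track=rewrite | github.com/CodeMaster7000/Advent-of-Code-2025-Solutions | Day6/main.py | split_problems
-- ===== SOURCE A (Python) =====
-- def split_problems(grid):
--     height = len(grid)
--     width = len(grid[0])
--
--     problems = []
--     start = None
--     for c in range(width):
--         if any(grid[r][c] != " " for r in range(height)):
--             if start is None:
--                 start = c
--         else:
--             if start is not None:
--                 problems.append((start, c))
--                 start = None
--     if start is not None:
--         problems.append((start, width))
--     return problems
-- ===== SOURCE B (Python) =====
-- def split_problems(grid):
--     height = len(grid)
--     width = len(grid[0])
--     nonblank = [any(grid[r][c] != " " for r in range(height)) for c in range(width)]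
--     problems = []
--     c = 0
--     while c < width:
--         if not nonblank[c]:
--             c += 1
--             continue
--         e = c + 1
--         while e < width and nonblank[e]:
--             e += 1
--         problems.append((c, e))
--         c = e
--     return problems
-- ===== Notes on version B (the rewrite author's own statement) =====
-- stated objective: alternative
-- what changed: B replaces A's Option-sentinel state machine (tracking 'start' across one fold over columns) by precomputing a per-column nonblank flag list and then scanning it with a two-pointer run scan that emits each (start, end) interval in one step.
import Mathlib
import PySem

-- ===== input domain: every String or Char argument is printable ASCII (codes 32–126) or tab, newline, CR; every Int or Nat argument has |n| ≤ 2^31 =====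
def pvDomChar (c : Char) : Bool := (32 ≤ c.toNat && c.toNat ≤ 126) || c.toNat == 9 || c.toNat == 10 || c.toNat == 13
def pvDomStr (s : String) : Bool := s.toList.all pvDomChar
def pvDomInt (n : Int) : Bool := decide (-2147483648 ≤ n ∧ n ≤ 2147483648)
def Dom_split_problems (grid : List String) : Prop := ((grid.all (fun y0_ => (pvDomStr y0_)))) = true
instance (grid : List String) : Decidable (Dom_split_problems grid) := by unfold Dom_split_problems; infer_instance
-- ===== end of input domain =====

-- B replaces A's Option-sentinel state machine by a precomputed per-column flag list
-- plus a two-pointer run scan emitting each (start, end) interval at once (objective: alternative).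

-- ===== PORT A =====
-- any(grid[r][c] != " " for r in range(height)); grid[r][c] ported via pyGet? with default ' ':
-- under Pre_ any out-of-range access is shadowed by an earlier nonblank row, so `any` agrees with Python.
def pvColNB (grid : List String) (c : Int) : Bool :=
  grid.any (fun row => ((PySem.Str.pyGet? row c).getD ' ') != ' ')

-- A's loop body: the Option `start` state machine.
def pvStepA (nbf : Int → Bool) (st : List (Int × Int) × Option Int) (c : Int) :
    List (Int × Int) × Option Int :=
  if nbf c then
    match st.2 with
    | none => (st.1, some c)
    | some _ => st
  else
    match st.2 with
    | some s => (st.1 ++ [(s, c)], none)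
    | none => st

def split_problems (grid : List String) : List (Int × Int) :=
  match PySem.List.pyGet? grid 0 with
  | none => []  -- Python raises IndexError on the empty grid; excluded by Pre_
  | some row0 =>
    let width : Int := PySem.Str.len row0
    let r := (PySem.List.pyRange 0 width 1).foldl (pvStepA (pvColNB grid)) ([], none)
    match r.2 with
    | some s => r.1 ++ [(s, width)]
    | none => r.1

-- ===== PORT B =====
-- B: scan the precomputed flag list; on a `true`, take the whole run at once (the inner while).
def pvScan : List Bool → Int → List (Int × Int)
  | [], _ => []
  | false :: rest, c => pvScan rest (c + 1)
  | true :: rest, c =>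
    let k := (rest.takeWhile (fun b => b)).length
    (c, c + 1 + (k : Int)) :: pvScan (rest.drop k) (c + 1 + (k : Int))
termination_by flags _ => flags.length
decreasing_by
  all_goals (simp; try omega)

def split_problems_alt (grid : List String) : List (Int × Int) :=
  match PySem.List.pyGet? grid 0 with
  | none => []  -- len(grid[0]) raises IndexError in B too; excluded by Pre_
  | some row0 =>
    let width : Int := PySem.Str.len row0
    let nonblank : List Bool := (PySem.List.pyRange 0 width 1).map (pvColNB grid)
    pvScan nonblank 0

-- ===== PRECONDITION & SPEC =====
-- Pre_ holds exactly when Python A returns (both A and B raise IndexError otherwise):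
-- the grid is nonempty, and whenever a row is too short for a column c, an earlier row is
-- nonblank at c, so the short-circuiting `any` never reaches the out-of-range access.
def Pre_split_problems (grid : List String) : Prop :=
  grid ≠ [] ∧
  ∀ c ∈ List.range (grid.headD "").toList.length,
    ∀ r ∈ List.range grid.length,
      (grid.getD r "").toList.length ≤ c →
        ∃ r' ∈ List.range r,
          c < (grid.getD r' "").toList.length ∧ (grid.getD r' "").toList.getD c ' ' ≠ ' '
instance (grid : List String) : Decidable (Pre_split_problems grid) := by
  unfold Pre_split_problems; infer_instance

def pvWitness_split_problems : List String := ["1 2", "3 4"]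

def Spec_split_problems (grid : List String) (out : List (Int × Int)) : Prop := out = split_problems_alt grid
instance (grid : List String) (out : List (Int × Int)) : Decidable (Spec_split_problems grid out) := by unfold Spec_split_problems; infer_instance

-- ===== CLAIM (what is proved, stated in full; the proofs are below) =====
def Claim_equal_split_problems : Prop := ∀ (grid : List String), Dom_split_problems grid → Pre_split_problems grid → Spec_split_problems grid (split_problems grid)

-- ===== LEMMAS AND PROOFS =====

-- A's state machine, rephrased on the flag list with an explicit column counter (proof device).
def pvALoop : List Bool → Int → Option Int → List (Int × Int) → List (Int × Int)
  | [], c, start, acc =>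
    match start with
    | some s => acc ++ [(s, c)]
    | none => acc
  | f :: rest, c, start, acc =>
    if f then
      pvALoop rest (c + 1) (match start with | none => some c | some s => some s) acc
    else
      match start with
      | some s => pvALoop rest (c + 1) none (acc ++ [(s, c)])
      | none => pvALoop rest (c + 1) none acc

-- Mutual characterisation of the state machine by run scans.
theorem pvBoth : ∀ (n : Nat) (flags : List Bool), flags.length ≤ n →
    (∀ c acc, pvALoop flags c none acc = acc ++ pvScan flags c) ∧
    (∀ c s acc, pvALoop flags c (some s) acc =
      acc ++ (s, c + ((flags.takeWhile (fun b => b)).length : Int)) ::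
        pvScan (flags.drop (flags.takeWhile (fun b => b)).length)
          (c + ((flags.takeWhile (fun b => b)).length : Int))) := by
  intro n
  induction n with
  | zero =>
    intro flags h
    have : flags = [] := List.eq_nil_of_length_eq_zero (Nat.le_zero.mp h)
    subst this
    constructor
    · intro c acc; simp [pvALoop, pvScan]
    · intro c s acc; simp [pvALoop, pvScan]
  | succ n ih =>
    intro flags h
    match flags with
    | [] =>
      constructor
      · intro c acc; simp [pvALoop, pvScan]
      · intro c s acc; simp [pvALoop, pvScan]
    | f :: rest =>
      have hr : rest.length ≤ n := by simpa using Nat.succ_le_succ_iff.mp (by simpa using h)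
      obtain ⟨ih1, ih2⟩ := ih rest hr
      cases f with
      | false =>
        constructor
        · intro c acc
          simp only [pvALoop]
          rw [ih1]
          simp [pvScan]
        · intro c s acc
          simp only [pvALoop]
          rw [ih1]
          simp [pvScan, List.takeWhile]
      | true =>
        constructor
        · intro c acc
          simp only [pvALoop]
          rw [ih2]
          simp [pvScan]
        · intro c s acc
          simp only [pvALoop]
          rw [ih2]
          have e1 : (((rest.takeWhile (fun b => b)).length + 1 : Nat) : Int)
              = ((rest.takeWhile (fun b => b)).length : Int) + 1 := by push_cast; ring
          have e2 : c + 1 + ((rest.takeWhile (fun b => b)).length : Int)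
              = c + (((rest.takeWhile (fun b => b)).length : Int) + 1) := by ring
          simp [List.drop_succ_cons, e1, e2]

-- The fold over pyRange with the final flush equals the state machine on the mapped flags.
theorem pvBridge (nbf : Int → Bool) : ∀ (n : Nat) (a b : Int), b - a = (n : Int) →
    ∀ (st : Option Int) (acc : List (Int × Int)),
    (match ((PySem.List.pyRange a b 1).foldl (pvStepA nbf) (acc, st)).2 with
     | some s => ((PySem.List.pyRange a b 1).foldl (pvStepA nbf) (acc, st)).1 ++ [(s, b)]
     | none => ((PySem.List.pyRange a b 1).foldl (pvStepA nbf) (acc, st)).1)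
    = pvALoop ((PySem.List.pyRange a b 1).map nbf) a st acc := by
  intro n
  induction n with
  | zero =>
    intro a b hab st acc
    have hba : b ≤ a := by omega
    rw [PySem.List.pyRange_one_eq_nil hba]
    have hba' : b = a := by omega
    subst hba'
    cases st <;> simp [pvALoop]
  | succ n ih =>
    intro a b hab st acc
    have hlt : a < b := by omega
    rw [PySem.List.pyRange_one_cons hlt]
    simp only [List.foldl_cons, List.map_cons]
    have hab' : b - (a + 1) = (n : Int) := by omega
    cases hnb : nbf a with
    | true =>
      cases st with
      | none =>
        simpa [pvStepA, hnb, pvALoop] using ih (a + 1) b hab' (some a) acc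
      | some s =>
        simpa [pvStepA, hnb, pvALoop] using ih (a + 1) b hab' (some s) acc
    | false =>
      cases st with
      | none =>
        simpa [pvStepA, hnb, pvALoop] using ih (a + 1) b hab' none acc
      | some s =>
        simpa [pvStepA, hnb, pvALoop] using ih (a + 1) b hab' none (acc ++ [(s, a)])

theorem pvMain (grid : List String) : split_problems grid = split_problems_alt grid := by
  unfold split_problems split_problems_alt
  cases hg : PySem.List.pyGet? grid 0 with
  | none => rfl
  | some row0 =>
    simp only []
    have hw : (0 : Int) ≤ PySem.Str.len row0 := by
      rw [PySem.Str.len_eq]; exact Int.natCast_nonneg _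
    have hn : PySem.Str.len row0 - 0 = ((PySem.Str.len row0).toNat : Int) := by omega
    have h1 := (pvBoth ((PySem.List.pyRange 0 (PySem.Str.len row0) 1).map (pvColNB grid)).length
      ((PySem.List.pyRange 0 (PySem.Str.len row0) 1).map (pvColNB grid)) (le_refl _)).1 0 ([] : List (Int × Int))
    rw [List.nil_append] at h1
    rw [← h1]
    exact pvBridge (pvColNB grid) (PySem.Str.len row0).toNat 0 (PySem.Str.len row0) hn none []

-- ===== VERDICT (by name: the statement is the Claim_ definition above) =====
theorem split_problems_spec : Claim_equal_split_problems := by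
  intro grid _ _
  unfold Spec_split_problems
  exact pvMain grid
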